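-- pv_equiv track=rewrite | github.com/supermartynov/AV_labs | lab6/helper.py | textFinder
-- ===== SOURCE A (Python) =====
-- def textFinder(x_profile, y_profile):
--     height = len(x_profile)
--     width = len(y_profile)
--     top_coord = 0
--     bottom_coord = 0
--     left_coord = 0
--     right_coord = 0
--
--     for j in reversed(range(width)):
--         if bottom_coord == 0:
--             if y_profile[j] < 2:
--                 continue
--             else:
--                 bottom_coord = j
--     for j in range(width):
--         if top_coord == 0:
--             if y_profile[j] < 2:
--                 continue
--             else:
--                 top_coord = j
--
--     for i in range(height):
--         if left_coord == 0:
--             if x_profile[i] < 2: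
--                 continue
--             else:
--                 left_coord = i
--                 break
--
--     for i in reversed(range(height)):
--         if right_coord == 0:
--             if x_profile[i] > 0:
--                 right_coord = i
--             else:
--                 continue
--
--     return bottom_coord, top_coord, left_coord, right_coord
-- ===== SOURCE B (Python) =====
-- def textFinder(x_profile, y_profile):
--     # Two forward passes instead of four scans (two of them reversed).
--     top_coord = 0
--     bottom_coord = 0
--     for j, v in enumerate(y_profile):
--         if v >= 2:
--             if top_coord == 0:
--                 top_coord = j
--             bottom_coord = j
--     left_coord = next((i for i, v in enumerate(x_profile) if v >= 2), 0)
--     right_coord = 0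
--     for i, v in enumerate(x_profile):
--         if v > 0:
--             right_coord = i
--     return bottom_coord, top_coord, left_coord, right_coord
-- ===== Notes on version B (the rewrite author's own statement) =====
-- stated objective: simpler
-- what changed: Replaces A's four index-range scans (two of them reversed, with guard-and-continue logic) by two plain forward passes over the lists: one pass over y_profile tracking top (first-set) and bottom (last-overwrite) together, plus a first-match search and a last-overwrite pass over x_profile.
import Mathlib
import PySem

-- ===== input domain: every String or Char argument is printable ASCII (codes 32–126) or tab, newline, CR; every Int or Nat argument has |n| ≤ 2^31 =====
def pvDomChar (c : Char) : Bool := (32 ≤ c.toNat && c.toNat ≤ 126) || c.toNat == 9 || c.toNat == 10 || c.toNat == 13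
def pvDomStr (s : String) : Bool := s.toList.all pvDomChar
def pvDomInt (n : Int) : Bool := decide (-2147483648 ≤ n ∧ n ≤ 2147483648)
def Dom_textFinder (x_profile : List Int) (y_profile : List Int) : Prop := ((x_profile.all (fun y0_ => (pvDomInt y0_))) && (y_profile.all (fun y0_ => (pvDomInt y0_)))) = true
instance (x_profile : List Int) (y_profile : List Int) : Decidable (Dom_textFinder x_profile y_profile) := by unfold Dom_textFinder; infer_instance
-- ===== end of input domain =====

-- B replaces A's four index-range scans (two reversed) by two plain forward passes over the lists; same return value, objective: simpler.

-- ===== PORT A =====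
-- the 'for i in range(height): … break' loop of A (break = stop recursing)
def pvLeftLoop (x_profile : List Int) : List Int → Int → Int
  | [], l => l
  | i :: rest, l =>
    if l = 0 then
      if PySem.List.pyGetD x_profile i 0 < 2 then pvLeftLoop x_profile rest l
      else i
    else pvLeftLoop x_profile rest l

def textFinder (x_profile : List Int) (y_profile : List Int) : Int × Int × Int × Int :=
  let height : Int := x_profile.length
  let width : Int := y_profile.length
  let bottom_coord : Int :=
    ((PySem.List.pyRange 0 width 1).reverse).foldl
      (fun b j => if b = 0 then (if PySem.List.pyGetD y_profile j 0 < 2 then b else j) else b) 0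
  let top_coord : Int :=
    (PySem.List.pyRange 0 width 1).foldl
      (fun t j => if t = 0 then (if PySem.List.pyGetD y_profile j 0 < 2 then t else j) else t) 0
  let left_coord : Int := pvLeftLoop x_profile (PySem.List.pyRange 0 height 1) 0
  let right_coord : Int :=
    ((PySem.List.pyRange 0 height 1).reverse).foldl
      (fun r i => if r = 0 then (if PySem.List.pyGetD x_profile i 0 > 0 then i else r) else r) 0
  (bottom_coord, top_coord, left_coord, right_coord)

-- ===== PORT B =====
def textFinder_alt (x_profile : List Int) (y_profile : List Int) : Int × Int × Int × Int :=
  let tb : Int × Int :=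
    (PySem.List.enumerate y_profile).foldl
      (fun p jv => if 2 ≤ jv.2 then ((if p.1 = 0 then jv.1 else p.1), jv.1) else p) (0, 0)
  let left_coord : Int :=
    match (PySem.List.enumerate x_profile).find? (fun iv => decide (2 ≤ iv.2)) with
    | some iv => iv.1
    | none => 0
  let right_coord : Int :=
    (PySem.List.enumerate x_profile).foldl (fun r iv => if 0 < iv.2 then iv.1 else r) 0
  (tb.2, tb.1, left_coord, right_coord)

-- ===== PRECONDITION & SPEC =====
def Spec_textFinder (x_profile : List Int) (y_profile : List Int) (out : Int × Int × Int × Int) : Prop := out = textFinder_alt x_profile y_profile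
instance (x_profile : List Int) (y_profile : List Int) (out : Int × Int × Int × Int) : Decidable (Spec_textFinder x_profile y_profile out) := by unfold Spec_textFinder; infer_instance

-- ===== CLAIM (what is proved, stated in full; the proofs are below) =====
def Claim_equal_textFinder : Prop := ∀ (x_profile : List Int) (y_profile : List Int), Dom_textFinder x_profile y_profile → Spec_textFinder x_profile y_profile (textFinder x_profile y_profile)

-- ===== LEMMAS AND PROOFS =====

-- generic shapes: A's guarded first-hit body (g1) and B's overwrite body (g2)
def pvG1 (P : Int → Prop) [DecidablePred P] (b : Int) (p : Int × Int) : Int :=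
  if b = 0 then (if P p.2 then p.1 else b) else b
def pvG2 (P : Int → Prop) [DecidablePred P] (b : Int) (p : Int × Int) : Int :=
  if P p.2 then p.1 else b

theorem pvG1_keep (P : Int → Prop) [DecidablePred P] (l : List (Int × Int)) (acc : Int)
    (h : acc ≠ 0) : l.foldl (pvG1 P) acc = acc := by
  induction l with
  | nil => rfl
  | cons p rest ih => simp [pvG1, h, ih]

-- first-hit-from-the-end with a `== 0` guard equals last-overwrite forward, over enumerate from 0
theorem pvRevGuard (P : Int → Prop) [DecidablePred P] (y : List Int) :
    ((PySem.List.enumerate y 0).reverse).foldl (pvG1 P) 0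
      = (PySem.List.enumerate y 0).foldl (pvG2 P) 0 := by
  induction y using List.reverseRecOn with
  | nil => rfl
  | append_singleton ys v ih =>
    rw [PySem.List.enumerate_append, List.reverse_append, List.foldl_append, List.foldl_append]
    simp only [PySem.List.enumerate_cons, PySem.List.enumerate_nil, List.reverse_cons,
      List.reverse_nil, List.nil_append, List.foldl_cons, List.foldl_nil]
    by_cases hP : P v
    · by_cases hys : ys = []
      · subst hys
        simp [pvG1, pvG2, hP, PySem.List.enumerate_nil]
      · have hlen : ys.length ≠ 0 := by simpa [List.length_eq_zero_iff] using hys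
        have hne : ((0 : Int) + (ys.length : Int)) ≠ 0 := by
          intro h; apply hlen; omega
        rw [show pvG1 P 0 ((0 : Int) + (ys.length : Int), v) = (0 : Int) + (ys.length : Int) from by
          simp [pvG1, hP]]
        rw [pvG1_keep P _ _ hne]
        simp [pvG2, hP]
    · rw [show pvG1 P 0 ((0 : Int) + (ys.length : Int), v) = (0 : Int) from by simp [pvG1, hP]]
      rw [ih]
      simp [pvG2, hP]

-- bridge: an index loop over range(len(y)) reading y[j] is a loop over enumerate(y)
theorem pvEnumFold {β : Type} (y : List Int) (F : β → Int → Int → β) (init : β) :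
    (PySem.List.pyRange 0 (y.length : Int) 1).foldl
        (fun s j => F s j (PySem.List.pyGetD y j 0)) init
      = (PySem.List.enumerate y 0).foldl (fun s p => F s p.1 p.2) init := by
  rw [PySem.List.enumerate_eq_map_pyRange (d := 0), List.foldl_map]
  simp

theorem pvEnumFoldRev {β : Type} (y : List Int) (F : β → Int → Int → β) (init : β) :
    ((PySem.List.pyRange 0 (y.length : Int) 1).reverse).foldl
        (fun s j => F s j (PySem.List.pyGetD y j 0)) init
      = ((PySem.List.enumerate y 0).reverse).foldl (fun s p => F s p.1 p.2) init := by
  rw [PySem.List.enumerate_eq_map_pyRange (d := 0), ← List.map_reverse, List.foldl_map]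
  simp

theorem pvEnumFind (x : List Int) (p : Int × Int → Bool) :
    (PySem.List.enumerate x 0).find? p
      = ((PySem.List.pyRange 0 (x.length : Int) 1).find?
          (fun j => p (j, PySem.List.pyGetD x j 0))).map
          (fun j => (j, PySem.List.pyGetD x j 0)) := by
  rw [PySem.List.enumerate_eq_map_pyRange (d := 0), List.find?_map]
  rfl

theorem pvLeftLoop_find (x : List Int) (js : List Int) :
    pvLeftLoop x js 0
      = ((js.find? (fun i => !decide (PySem.List.pyGetD x i 0 < 2))).getD 0) := by
  induction js with
  | nil => rfl
  | cons i rest ih =>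
    by_cases h : PySem.List.pyGetD x i 0 < 2
    · simp [pvLeftLoop, List.find?, h, ih]
    · simp [pvLeftLoop, List.find?, h]

theorem textFinder_spec : Claim_equal_textFinder := by
  intro x y _
  unfold Spec_textFinder textFinder textFinder_alt
  dsimp only
  -- B's paired (top, bottom) loop is two independent loops
  rw [show (fun (p : Int × Int) (jv : Int × Int) =>
        if 2 ≤ jv.2 then ((if p.1 = 0 then jv.1 else p.1), jv.1) else p)
      = (fun (p : Int × Int) (jv : Int × Int) =>
          ((fun (t : Int) (jv : Int × Int) => if 2 ≤ jv.2 then (if t = 0 then jv.1 else t) else t) p.1 jv,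
           (fun (b : Int) (jv : Int × Int) => if 2 ≤ jv.2 then jv.1 else b) p.2 jv)) from by
    funext p jv; by_cases h : 2 ≤ jv.2 <;> simp [h]]
  rw [PySem.List.foldl_prod_mk
      (f := fun (t : Int) (jv : Int × Int) => if 2 ≤ jv.2 then (if t = 0 then jv.1 else t) else t)
      (g := fun (b : Int) (jv : Int × Int) => if 2 ≤ jv.2 then jv.1 else b)]
  -- bottom
  have hbot : ((PySem.List.pyRange 0 (y.length : Int) 1).reverse).foldl
      (fun b j => if b = 0 then (if PySem.List.pyGetD y j 0 < 2 then b else j) else b) 0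
      = (PySem.List.enumerate y 0).foldl
          (fun (b : Int) (jv : Int × Int) => if 2 ≤ jv.2 then jv.1 else b) 0 := by
    rw [pvEnumFoldRev y (fun b j v => if b = 0 then (if v < 2 then b else j) else b)]
    rw [show (fun (s : Int) (p : Int × Int) => if s = 0 then (if p.2 < 2 then s else p.1) else s)
        = pvG1 (fun v => 2 ≤ v) from by
      funext b p; simp only [pvG1]; split_ifs <;> omega]
    rw [pvRevGuard]
    rfl
  -- top
  have htop : (PySem.List.pyRange 0 (y.length : Int) 1).foldl
      (fun t j => if t = 0 then (if PySem.List.pyGetD y j 0 < 2 then t else j) else t) 0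
      = (PySem.List.enumerate y 0).foldl
          (fun (t : Int) (jv : Int × Int) => if 2 ≤ jv.2 then (if t = 0 then jv.1 else t) else t) 0 := by
    rw [pvEnumFold y (fun t j v => if t = 0 then (if v < 2 then t else j) else t)]
    congr 1
    funext t p; split_ifs <;> omega
  -- left
  have hleft : pvLeftLoop x (PySem.List.pyRange 0 (x.length : Int) 1) 0
      = (match (PySem.List.enumerate x 0).find? (fun iv => decide (2 ≤ iv.2)) with
         | some iv => iv.1
         | none => (0 : Int)) := by
    rw [pvLeftLoop_find, pvEnumFind]
    have hpred : (fun j => decide (2 ≤ PySem.List.pyGetD x j 0))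
        = (fun i => !decide (PySem.List.pyGetD x i 0 < 2)) := by
      funext j
      by_cases h : PySem.List.pyGetD x j 0 < 2
      · have h2 : ¬ (2 ≤ PySem.List.pyGetD x j 0) := by omega
        simp [h, h2]
      · have h2 : 2 ≤ PySem.List.pyGetD x j 0 := by omega
        simp [h, h2]
    rw [hpred]
    cases hfind : (PySem.List.pyRange 0 (x.length : Int) 1).find?
        (fun i => !decide (PySem.List.pyGetD x i 0 < 2)) with
    | none => rfl
    | some j => rfl
  -- right
  have hright : ((PySem.List.pyRange 0 (x.length : Int) 1).reverse).foldl
      (fun r i => if r = 0 then (if PySem.List.pyGetD x i 0 > 0 then i else r) else r) 0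
      = (PySem.List.enumerate x 0).foldl
          (fun (r : Int) (iv : Int × Int) => if 0 < iv.2 then iv.1 else r) 0 := by
    rw [pvEnumFoldRev x (fun r i v => if r = 0 then (if v > 0 then i else r) else r)]
    rw [show (fun (s : Int) (p : Int × Int) => if s = 0 then (if p.2 > 0 then p.1 else s) else s)
        = pvG1 (fun v => 0 < v) from by
      funext r p; simp only [pvG1]]
    rw [pvRevGuard]
    rfl
  simp only [hbot, htop, hleft, hright]
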